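-- pv_equiv track=rewrite | github.com/kscanne/crubadan | clustering/AccuracyAnalysis.py | stringConvert
-- ===== SOURCE A (Python) =====
-- def stringConvert(string):
--     setlist = []
--     currentword = ""
--     namestatus = 1
--     resultstring = ""
--     for character in string:
--         if (namestatus == 1) & (character != "/"):
--             currentword += character
--         elif (namestatus == 1) & (character == "/"):
--             if currentword not in setlist:
--                 setlist.append(currentword)
--             resultstring += str(setlist.index(currentword))
--             currentword = ""
--             namestatus = 0
--         elif namestatus == 0:
--             if character == " ":
--                 namestatus = 1
--     return resultstring
-- ===== SOURCE B (Python) =====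
-- def stringConvert(string):
--     # Parse by scanning with partition instead of a char-by-char state machine,
--     # then index the words with a dict instead of repeated list.index scans.
--     words = []
--     rest = string
--     while '/' in rest:
--         word, _, rest = rest.partition('/')
--         words.append(word)
--         if ' ' in rest:
--             _, _, rest = rest.partition(' ')
--         else:
--             rest = ''
--     index = {}
--     parts = []
--     for w in words:
--         if w in index:
--             parts.append(str(index[w]))
--         else:
--             parts.append(str(len(index)))
--             index[w] = len(index)
--     return ''.join(parts)
-- ===== Notes on version B (the rewrite author's own statement) =====
-- stated objective: faster
-- what changed: Replaces the char-by-char two-state machine with list.index/membership scans over the word list by a partition-based tokenizer that jumps between delimiters, followed by a separate indexing pass that uses a dict word->first index instead of repeated list scans.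
import Mathlib
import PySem

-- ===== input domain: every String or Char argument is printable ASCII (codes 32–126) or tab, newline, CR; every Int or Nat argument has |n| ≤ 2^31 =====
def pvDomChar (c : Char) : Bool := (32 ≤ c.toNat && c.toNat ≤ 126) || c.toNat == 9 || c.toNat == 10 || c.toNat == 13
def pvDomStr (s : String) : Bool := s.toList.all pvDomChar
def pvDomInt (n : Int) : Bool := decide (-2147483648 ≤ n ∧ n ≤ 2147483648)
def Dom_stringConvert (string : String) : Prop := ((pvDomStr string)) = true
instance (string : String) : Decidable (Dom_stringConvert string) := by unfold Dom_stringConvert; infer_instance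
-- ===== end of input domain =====

-- B replaces A's char-by-char state machine (with list.index rescans) by a partition-based
-- tokenizer plus a dict-indexed rendering pass; a timing run decides the speed label.

-- ===== PORT A =====
-- Strings are carried as List Char (PySem-style); the loop is A's for-loop state machine.
def stringConvertLoop (chars : List Char) (setlist : List (List Char))
    (currentword : List Char) (namestatus : Int) (resultstring : List Char) : List Char :=
  match chars with
  | [] => resultstring
  | c :: rest =>
    if namestatus == 1 && c != '/' then
      stringConvertLoop rest setlist (currentword ++ [c]) namestatus resultstring
    else if namestatus == 1 && c == '/' then
      let setlist' := if currentword ∈ setlist then setlist else setlist ++ [currentword]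
      -- currentword ∈ setlist' always holds here, so Python's list.index never raises;
      -- index? is some and getD 0 is the index.
      stringConvertLoop rest setlist' [] 0
        (resultstring ++ (PySem.Int.toStr (((PySem.List.index? setlist' currentword).getD 0 : Nat) : Int)).toList)
    else if namestatus == 0 then
      (if c == ' ' then stringConvertLoop rest setlist currentword 1 resultstring
       else stringConvertLoop rest setlist currentword namestatus resultstring)
    else stringConvertLoop rest setlist currentword namestatus resultstring

def stringConvert (string : String) : String :=
  String.mk (stringConvertLoop string.toList [] [] 1 [])

-- ===== PORT B =====
-- Source B's while loop: rest.partition('/') on a single char = (takeWhile (≠'/'), the '/',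
-- dropWhile-tail); ported by hand (exact for one-character separators), 'c in rest' = c ∈ rest.
def pvTailLen (l : List Char) : l.tail.length ≤ l.length := by
  cases l <;> simp

def pvWords (chars : List Char) : List (List Char) :=
  if h : '/' ∈ chars then
    let word := chars.takeWhile (· ≠ '/')
    let rest1 := (chars.dropWhile (· ≠ '/')).tail
    let rest := if ' ' ∈ rest1 then (rest1.dropWhile (· ≠ ' ')).tail else []
    word :: pvWords rest
  else []
termination_by chars.length
decreasing_by
  have hne : chars ≠ [] := by rintro rfl; simp at h
  have h1 : (chars.dropWhile (· ≠ '/')).tail.length < chars.length := by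
    have hlt : (chars.dropWhile (· ≠ '/')).tail.length = (chars.dropWhile (· ≠ '/')).length - 1 := List.length_tail
    have hd : (chars.dropWhile (· ≠ '/')) ≠ [] := by
      simp only [ne_eq, List.dropWhile_eq_nil_iff]
      push_neg
      exact ⟨'/', h, by simp⟩
    have hdl : (chars.dropWhile (· ≠ '/')).length ≤ chars.length := List.length_dropWhile_le _ _
    have : 0 < (chars.dropWhile (· ≠ '/')).length := List.length_pos_iff.mpr hd
    omega
  split
  · have h2 := pvTailLen (((chars.dropWhile (· ≠ '/')).tail).dropWhile (· ≠ ' '))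
    have h3 := List.length_dropWhile_le (fun c => decide (c ≠ ' ')) ((chars.dropWhile (· ≠ '/')).tail)
    omega
  · simpa using List.length_pos_iff.mpr hne

-- Source B's second loop: dict word -> first index; ''.join of the emitted parts is the
-- concatenation this recursion builds.
def pvRender (words : List (List Char)) (index : PySem.Dict (List Char) Int) : List Char :=
  match words with
  | [] => []
  | w :: ws =>
    if index.contains w then
      (PySem.Int.toStr ((index.get? w).getD 0)).toList ++ pvRender ws index
    else
      (PySem.Int.toStr (index.size : Int)).toList ++ pvRender ws (index.insert w (index.size : Int))

def stringConvert_alt (string : String) : String :=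
  String.mk (pvRender (pvWords string.toList) PySem.Dict.empty)

-- ===== PRECONDITION & SPEC =====
def Spec_stringConvert (string : String) (out : String) : Prop := out = stringConvert_alt string
instance (string : String) (out : String) : Decidable (Spec_stringConvert string out) := by unfold Spec_stringConvert; infer_instance

-- ===== CLAIM (what is proved, stated in full; the proofs are below) =====
def Claim_equal_stringConvert : Prop := ∀ (string : String), Dom_stringConvert string → Spec_stringConvert string (stringConvert string)

-- ===== LEMMAS AND PROOFS =====

-- Specification words: the word list A's state machine extracts (name state / tag state).
mutual
def wordsN (cw : List Char) : List Char → List (List Char)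
  | [] => []
  | c :: rest => if c ≠ '/' then wordsN (cw ++ [c]) rest else cw :: wordsT rest
def wordsT : List Char → List (List Char)
  | [] => []
  | c :: rest => if c = ' ' then wordsN [] rest else wordsT rest
end

-- A's rendering of a word list with its setlist accumulator.
def renderA (setlist : List (List Char)) : List (List Char) → List Char
  | [] => []
  | w :: ws =>
    (PySem.Int.toStr (((PySem.List.index? (if w ∈ setlist then setlist else setlist ++ [w]) w).getD 0 : Nat) : Int)).toList
      ++ renderA (if w ∈ setlist then setlist else setlist ++ [w]) ws

theorem renderA_cons (setlist : List (List Char)) (w : List Char) (ws : List (List Char)) :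
    renderA setlist (w :: ws) =
      (PySem.Int.toStr (((PySem.List.index? (if w ∈ setlist then setlist else setlist ++ [w]) w).getD 0 : Nat) : Int)).toList
        ++ renderA (if w ∈ setlist then setlist else setlist ++ [w]) ws := rfl

theorem aLoop_eq_renderA (chars : List Char) :
    (∀ setlist cw res, stringConvertLoop chars setlist cw 1 res = res ++ renderA setlist (wordsN cw chars))
    ∧ (∀ setlist res, stringConvertLoop chars setlist [] 0 res = res ++ renderA setlist (wordsT chars)) := by
  induction chars with
  | nil => simp [stringConvertLoop, wordsN, wordsT, renderA]
  | cons c rest ih =>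
    constructor
    · intro setlist cw res
      by_cases hc : c = '/'
      · subst hc
        simp only [stringConvertLoop, wordsN, bne_self_eq_false, beq_self_eq_true,
          Bool.and_false, Bool.and_true, Bool.false_eq_true, if_false, if_true, ne_eq,
          not_true_eq_false]
        rw [ih.2, renderA_cons]
        simp [List.append_assoc]
      · simp only [stringConvertLoop, wordsN]
        rw [if_pos (by simp [hc]), if_pos (by simp [hc]), ih.1]
    · intro setlist res
      have h01 : ((0 : Int) == 1) = false := rfl
      have h00 : ((0 : Int) == 0) = true := rfl
      by_cases hc : c = ' '
      · subst hc
        simp only [stringConvertLoop, wordsT, h01, h00, Bool.false_and, Bool.false_eq_true,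
          if_false, if_true, beq_self_eq_true, ite_true]
        exact ih.1 setlist [] res
      · simp only [stringConvertLoop, wordsT, h01, h00, Bool.false_and, Bool.false_eq_true,
          if_false, if_true]
        rw [if_neg (by simp [hc]), if_neg hc, ih.2]

theorem wordsN_spec (chars : List Char) : ∀ cw,
    wordsN cw chars = if '/' ∈ chars then
      (cw ++ chars.takeWhile (· ≠ '/')) :: wordsT ((chars.dropWhile (· ≠ '/')).tail) else [] := by
  induction chars with
  | nil => simp [wordsN]
  | cons c rest ih =>
    intro cw
    by_cases hc : c = '/'
    · subst hc; simp [wordsN, List.takeWhile, List.dropWhile]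
    · simp only [wordsN, List.mem_cons, if_pos (by simp [hc] : c ≠ '/'), ih,
        List.takeWhile_cons, List.dropWhile_cons]
      by_cases hm : '/' ∈ rest <;> simp [hm, hc, eq_comm]

theorem wordsT_spec (chars : List Char) :
    wordsT chars = if ' ' ∈ chars then wordsN [] ((chars.dropWhile (· ≠ ' ')).tail) else [] := by
  induction chars with
  | nil => simp [wordsT]
  | cons c rest ih =>
    by_cases hc : c = ' '
    · subst hc; simp [wordsT, List.dropWhile]
    · simp only [wordsT, if_neg hc, ih, List.mem_cons, List.dropWhile_cons]
      by_cases hm : ' ' ∈ rest <;> simp [hm, hc, eq_comm]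

theorem pvWords_eq_wordsN (n : Nat) : ∀ chars : List Char, chars.length ≤ n →
    pvWords chars = wordsN [] chars := by
  induction n with
  | zero =>
    intro chars h
    have : chars = [] := List.eq_nil_of_length_eq_zero (by omega)
    subst this; simp [pvWords, wordsN]
  | succ n ih =>
    intro chars h
    rw [pvWords, wordsN_spec]
    by_cases hm : '/' ∈ chars
    · rw [dif_pos hm, if_pos hm]
      simp only [List.nil_append]
      congr 1
      rw [wordsT_spec]
      set rest1 := (chars.dropWhile (· ≠ '/')).tail with hrest1
      have h1 : rest1.length < chars.length := by
        have hd : (chars.dropWhile (· ≠ '/')) ≠ [] := by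
          simp only [ne_eq, List.dropWhile_eq_nil_iff]
          push_neg
          exact ⟨'/', hm, by simp⟩
        have hdl : (chars.dropWhile (· ≠ '/')).length ≤ chars.length := List.length_dropWhile_le _ _
        have hp : 0 < (chars.dropWhile (· ≠ '/')).length := List.length_pos_iff.mpr hd
        simp only [hrest1, List.length_tail]
        omega
      by_cases hs : ' ' ∈ rest1
      · rw [if_pos hs, if_pos hs]
        apply ih
        have h2 := pvTailLen (rest1.dropWhile (· ≠ ' '))
        have h3 := List.length_dropWhile_le (fun c => decide (c ≠ ' ')) rest1
        omega
      · rw [if_neg hs, if_neg hs]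
        exact (by simp [pvWords, wordsN] : pvWords [] = wordsN [] [])
    · rw [dif_neg hm, if_neg hm]

theorem index?_append_singleton_ne {w w' : List Char} (setlist : List (List Char))
    (hne : w' ≠ w) : PySem.List.index? (setlist ++ [w]) w' = PySem.List.index? setlist w' := by
  by_cases hm : w' ∈ setlist
  · exact PySem.List.index?_append_of_mem _ hm
  · rw [(PySem.List.index?_eq_none_iff _ _).mpr hm,
      (PySem.List.index?_eq_none_iff _ _).mpr (by simp [hm, hne])]

theorem pvRender_eq_renderA (words : List (List Char)) :
    ∀ (setlist : List (List Char)) (d : PySem.Dict (List Char) Int),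
    (∀ w, d.get? w = (PySem.List.index? setlist w).map (fun k => (k : Int))) →
    d.size = setlist.length →
    pvRender words d = renderA setlist words := by
  induction words with
  | nil => intro _ _ _ _; simp [pvRender, renderA]
  | cons w ws ih =>
    intro setlist d hget hsize
    have hcontains : d.contains w = decide (w ∈ setlist) := by
      rw [PySem.Dict.contains_eq_isSome_get?, hget w]
      by_cases hm : w ∈ setlist
      · obtain ⟨k, hk⟩ := Option.isSome_iff_exists.mp ((PySem.List.index?_isSome_iff _ _).mpr hm)
        rw [hk]; simp [hm]
      · rw [(PySem.List.index?_eq_none_iff _ _).mpr hm]; simp [hm]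
    by_cases hm : w ∈ setlist
    · obtain ⟨k, hk⟩ := Option.isSome_iff_exists.mp ((PySem.List.index?_isSome_iff _ _).mpr hm)
      rw [pvRender, renderA, if_pos hm, hcontains, if_pos (by simp [hm]), hget w, hk,
        ih setlist d hget hsize]
      simp
    · have hidx : PySem.List.index? (setlist ++ [w]) w = some setlist.length :=
        PySem.List.index?_append_singleton_self setlist w hm
      rw [pvRender, renderA, if_neg hm, hcontains, if_neg (by simp [hm]), hidx]
      congr 1
      · simp [hsize]
      · apply ih (setlist ++ [w])
        · intro w'
          rw [PySem.Dict.get?_insert]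
          by_cases he : w' = w
          · subst he; rw [hidx]; simp [hsize]
          · rw [if_neg he, hget w', index?_append_singleton_ne setlist he]
        · rw [PySem.Dict.size_insert, hcontains]
          simp [hm, hsize]

-- ===== VERDICT (by name: the statement is the Claim_ definition above) =====
theorem stringConvert_spec : Claim_equal_stringConvert := by
  intro string _
  unfold Spec_stringConvert stringConvert stringConvert_alt
  rw [(aLoop_eq_renderA string.toList).1 [] [] []]
  rw [pvWords_eq_wordsN string.toList.length string.toList le_rfl]
  rw [pvRender_eq_renderA _ [] PySem.Dict.empty (by intro w; simp) (by simp)]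
  simp
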